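-- pv_equiv track=rewrite | github.com/cry999/AtCoder | beginner-contest/091/D.py | two_sequences
-- ===== SOURCE A (Python) =====
-- def lower_bound(A: list, v: int) -> int:
--     l, r = -1, len(A)
--     while r - l > 1:
--         m = (r + l) // 2
--         if A[m] < v:
--             l = m
--         else:
--             r = m
--     return r
--
-- def count(A: list, a: int, b: int) -> int:
--     l = lower_bound(A, a)
--     u = lower_bound(A, b)
--     return u - l
--
-- def two_sequences(N: int, A: list, B: list) -> int:
--     BIT_LIM = 40
--
--     res = 0
--     for k in range(BIT_LIM):
--         T = 1 << (k+1)
--         sorted_B = sorted(b & (T-1) for b in B)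
--         num_kth_bit_is_1 = 0
--         for ai in A:
--             ai_mod = ai & (T-1)
--
--             T = T >> 1
--             num_kth_bit_is_1 += count(sorted_B, T - ai_mod, 2*T - ai_mod)
--             num_kth_bit_is_1 += count(sorted_B, 3*T - ai_mod, 4*T - ai_mod)
--             T = T << 1
--
--         res = ((num_kth_bit_is_1 & 1) << k) | res
--
--     return res
-- ===== SOURCE B (Python) =====
-- def two_sequences(N: int, A: list, B: list) -> int:
--     MASK = (1 << 40) - 1
--     res = 0
--     for ai in A:
--         for bj in B:
--             res ^= (ai + bj) & MASK
--     return res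
-- ===== Notes on version B (the rewrite author's own statement) =====
-- stated objective: simpler
-- what changed: Replaced the per-bit counting scheme (sorting B masked to k+1 bits and binary-searching two intervals per element of A for each of the 40 bits) by a direct double loop that XORs every pairwise sum masked to 40 bits.
import Mathlib
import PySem

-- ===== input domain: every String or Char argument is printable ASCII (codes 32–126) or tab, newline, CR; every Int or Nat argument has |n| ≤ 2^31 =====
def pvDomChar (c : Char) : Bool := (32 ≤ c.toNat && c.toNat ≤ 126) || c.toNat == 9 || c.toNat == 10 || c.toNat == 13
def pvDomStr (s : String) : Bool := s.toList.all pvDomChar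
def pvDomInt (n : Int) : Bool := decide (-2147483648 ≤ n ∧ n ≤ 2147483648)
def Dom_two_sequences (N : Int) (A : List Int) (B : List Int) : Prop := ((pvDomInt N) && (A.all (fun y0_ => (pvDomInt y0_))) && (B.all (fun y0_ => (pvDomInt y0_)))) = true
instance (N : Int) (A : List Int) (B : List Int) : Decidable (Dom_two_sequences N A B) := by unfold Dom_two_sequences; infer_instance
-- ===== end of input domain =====

-- ===== PORT A =====
-- B replaces A's per-bit sorted-counting scheme by a direct double loop XORing every
-- pairwise sum masked to 40 bits (objective: simpler); same return value, no mutation.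

-- the while-loop of lower_bound; l, r are the Int bounds exactly as in the Python
def pv_lower_bound_go (A : List Int) (v : Int) (l r : Int) : Int :=
  if _h : r - l > 1 then
    let m := PySem.Int.floordiv (r + l) 2
    -- A[m]: m is always in range here (-1 ≤ l, r ≤ len, r-l > 1), so .getD 0 is never taken
    if (PySem.List.pyGet? A m).getD 0 < v then pv_lower_bound_go A v m r
    else pv_lower_bound_go A v l m
  else r
termination_by (r - l).toNat
decreasing_by
  all_goals
    have h2 := PySem.Int.floordiv_eq_ediv_of_pos (a := r + l) (b := 2) (by omega)
    omega

def pv_lower_bound (A : List Int) (v : Int) : Int := pv_lower_bound_go A v (-1) (A.length : Int)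

def pv_count (A : List Int) (a b : Int) : Int :=
  let l := pv_lower_bound A a
  let u := pv_lower_bound A b
  u - l

def two_sequences (N : Int) (A : List Int) (B : List Int) : Int :=
  -- for k in range(40): k is a nonnegative loop index, ported as List.range 40
  (List.range 40).foldl (fun (res : Int) (k : Nat) =>
    let T : Int := (1 : Int) <<< (k + 1)
    let sortedB := PySem.List.sorted (B.map (fun b => PySem.Int.band b (T - 1))) (fun x => x) false
    let num : Int := A.foldl (fun num ai =>
      let aiMod := PySem.Int.band ai (T - 1)
      let t := T >>> (1 : Nat)   -- Python halves T in place and restores it after the two counts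
      let num := num + pv_count sortedB (t - aiMod) (2 * t - aiMod)
      let num := num + pv_count sortedB (3 * t - aiMod) (4 * t - aiMod)
      num) 0
    PySem.Int.bor ((PySem.Int.band num 1) <<< k) res) 0

-- ===== PORT B =====
def two_sequences_alt (N : Int) (A : List Int) (B : List Int) : Int :=
  let mask : Int := (1 : Int) <<< (40 : Nat) - 1
  A.foldl (fun res ai =>
    B.foldl (fun res bj => PySem.Int.bxor res (PySem.Int.band (ai + bj) mask)) res) 0

-- ===== PRECONDITION & SPEC =====
def Spec_two_sequences (N : Int) (A : List Int) (B : List Int) (out : Int) : Prop := out = two_sequences_alt N A B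
instance (N : Int) (A : List Int) (B : List Int) (out : Int) : Decidable (Spec_two_sequences N A B out) := by unfold Spec_two_sequences; infer_instance

-- ===== CLAIM (what is proved, stated in full; the proofs are below) =====
def Claim_equal_two_sequences : Prop := ∀ (N : Int) (A : List Int) (B : List Int), Dom_two_sequences N A B → Spec_two_sequences N A B (two_sequences N A B)

-- ===== LEMMAS AND PROOFS =====

-- bit k of the integer s (infinite two's complement)
def pvBit (k : Nat) (s : Int) : Bool := decide (2 ^ k ≤ s % (2 ^ (k + 1)))

-- number of pairs (ai, bj) whose sum has bit k set
def pvCnt (k : Nat) (A B : List Int) : Nat :=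
  (A.map (fun ai => B.countP (fun b => pvBit k (ai + b)))).sum

-- the number whose bits are f 0 .. f (m-1)
def pvSumBits (f : Nat → Bool) (m : Nat) : Nat :=
  ((List.range m).map (fun k => 2 ^ k * (f k).toNat)).sum

-- the common value both programs compute
def pvTarget (A B : List Int) : Int :=
  ((pvSumBits (fun k => decide (pvCnt k A B % 2 = 1)) 40 : Nat) : Int)

-- Python & with an all-ones mask is emod by the power of two (either sign)
theorem pv_band_mask (x : Int) (m : Nat) :
    PySem.Int.band x (2 ^ m - 1) = x % (2 ^ m) := by
  have hc : ((2^m : Nat) : Int) = (2:Int)^m := by push_cast; ring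
  have h1 : 0 < (2^m : Nat) := by positivity
  have hm : ((2:Int)^m - 1).toNat = 2^m - 1 := by omega
  rw [PySem.Int.band.eq_1]
  by_cases hx : 0 ≤ x
  · simp only [if_pos hx, if_pos (by omega : (0:Int) ≤ (2:Int)^m - 1), hm]
    rw [Nat.and_two_pow_sub_one_eq_mod]
    conv_rhs => rw [← Int.toNat_of_nonneg hx, ← hc]
    exact_mod_cast rfl
  · simp only [if_neg hx, if_pos (by omega : (0:Int) ≤ (2:Int)^m - 1), hm]
    rw [Nat.and_comm, Nat.and_two_pow_sub_one_eq_mod]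
    have key : ∀ y : Nat, (-(y:Int) - 1) % ((2:Int)^m) = (2:Int)^m - 1 - (y % 2^m : Nat) := by
      intro y
      have h2 : (-(y:Int) - 1) = ((2:Int)^m - 1 - (y % 2^m : Nat)) + (2^m) * (-(y / 2^m : Nat) - 1) := by
        have h4 : ((2^m * (y / 2^m) + y % 2^m : Nat) : Int) = (y : Int) := by
          exact_mod_cast congrArg (Nat.cast : Nat → Int) (Nat.div_add_mod y (2^m))
        push_cast at h4 ⊢
        nlinarith [h4]
      rw [h2, Int.add_mul_emod_self_left]
      have hlt : (y % 2^m : Nat) < 2^m := Nat.mod_lt _ h1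
      rw [Int.emod_eq_of_lt (by omega) (by omega)]
    have hxe : x = -(((-x-1).toNat : Int)) - 1 := by omega
    conv_rhs => rw [hxe]
    rw [key]
    omega

-- Nat.testBit via the low k+1 bits
theorem pv_testBit_iff (x k : Nat) : x.testBit k = decide (2 ^ k ≤ x % 2 ^ (k + 1)) := by
  rw [Nat.testBit_eq_decide_div_mod_eq]
  have h2 : x % (2^k * 2) / 2^k = x / 2^k % 2 := Nat.mod_mul_right_div_self x (2^k) 2
  have h1 : x % 2 ^ (k+1) = x % (2^k * 2) := by rw [pow_succ]
  have hp : 0 < (2:Nat)^k := by positivity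
  have hlt : x % (2^k*2) < 2^k*2 := Nat.mod_lt _ (by positivity)
  rcases Nat.lt_or_ge (x % (2^k*2)) (2^k) with h | h
  · have h0 : x / 2^k % 2 = 0 := by rw [← h2]; exact Nat.div_eq_of_lt h
    rw [h0, h1]; simp; omega
  · have h0 : x / 2^k % 2 = 1 := by
      rw [← h2]
      have ha := (Nat.le_div_iff_mul_le hp).mpr (by omega : 1 * 2^k ≤ x % (2^k*2))
      have hb : x % (2^k*2) / 2^k < 2 := by rw [Nat.div_lt_iff_lt_mul hp]; omega
      omega
    rw [h0, h1]; simp; omega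

theorem pv_sumBits_succ (f : Nat → Bool) (m : Nat) :
    pvSumBits f (m+1) = pvSumBits f m + 2^m * (f m).toNat := by
  simp [pvSumBits, List.range_succ]

theorem pv_sumBits_lt (f : Nat → Bool) (m : Nat) : pvSumBits f m < 2 ^ m := by
  induction m with
  | zero => simp [pvSumBits]
  | succ n ih =>
    rw [pv_sumBits_succ, pow_succ]
    cases f n <;> simp <;> omega

theorem pv_sumBits_testBit (f : Nat → Bool) (m j : Nat) :
    (pvSumBits f m).testBit j = (decide (j < m) && f j) := by
  induction m with
  | zero =>
    simp [pvSumBits]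
  | succ n ih =>
    rw [pv_sumBits_succ]
    rcases Nat.lt_trichotomy j n with h | h | h
    · -- low bit: adding 2^n * b does not change testBit j
      rw [pv_testBit_iff] at ih ⊢
      have hd : (2:Nat)^(j+1) ∣ 2^n * (f n).toNat := dvd_mul_of_dvd_left (pow_dvd_pow 2 (by omega)) _
      have hz : (2^n * (f n).toNat) % 2^(j+1) = 0 := Nat.mod_eq_zero_of_dvd hd
      rw [Nat.add_mod, hz, Nat.add_zero, Nat.mod_mod_of_dvd _ dvd_rfl]
      rw [ih]
      simp [show j < n + 1 by omega, h]
    · subst h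
      have hlt := pv_sumBits_lt f j
      rw [pv_testBit_iff]
      have : (pvSumBits f j + 2^j * (f j).toNat) % 2^(j+1) = pvSumBits f j + 2^j * (f j).toNat := by
        apply Nat.mod_eq_of_lt; rw [pow_succ]; cases f j <;> simp <;> omega
      rw [this]
      cases f j <;> simp <;> omega
    · have hlt : pvSumBits f n + 2^n * (f n).toNat < 2^j := by
        have := pv_sumBits_lt f n
        have h2 : (2:Nat)^(n+1) ≤ 2^j := Nat.pow_le_pow_right (by norm_num) (by omega)
        rw [pow_succ] at h2; cases f n <;> simp <;> omega
      rw [Nat.testBit_lt_two_pow hlt]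
      simp; omega

theorem pv_sumBits_congr (f g : Nat → Bool) (m : Nat) (h : ∀ k, k < m → f k = g k) :
    pvSumBits f m = pvSumBits g m := by
  unfold pvSumBits
  congr 1
  apply List.map_congr_left
  intro k hk
  rw [h k (List.mem_range.mp hk)]

-- xor against a 40-bit number flips exactly the set bits
theorem pv_xor_sumBits (g : Nat → Bool) (v : Nat) (hv : v < 2 ^ 40) :
    pvSumBits g 40 ^^^ v = pvSumBits (fun k => g k ^^ v.testBit k) 40 := by
  apply Nat.eq_of_testBit_eq
  intro j
  rw [Nat.testBit_xor, pv_sumBits_testBit, pv_sumBits_testBit]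
  by_cases hj : j < 40
  · simp [hj]
  · simp [hj]
    exact Nat.testBit_lt_two_pow (lt_of_lt_of_le hv (Nat.pow_le_pow_right (by norm_num) (by omega)))

-- setting a fresh high bit by | is addition
theorem pv_lor_step (a b k : Nat) (ha : a < 2 ^ k) (hb : b ≤ 1) :
    (b <<< k) ||| a = b * 2 ^ k + a := by
  interval_cases b
  · simp
  · apply Nat.eq_of_testBit_eq
    intro j
    rw [Nat.testBit_lor, Nat.testBit_shiftLeft]
    have hp : 0 < (2:Nat)^k := by positivity
    rcases Nat.lt_trichotomy j k with h | h | h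
    · have h1 : ¬ (k ≤ j) := by omega
      have hd : (2:Nat)^(j+1) ∣ 1 * 2^k := by simpa using pow_dvd_pow 2 (by omega : j+1 ≤ k)
      rw [pv_testBit_iff (1 * 2^k + a) j, Nat.add_mod, Nat.mod_eq_zero_of_dvd hd, Nat.zero_add,
        Nat.mod_mod_of_dvd _ dvd_rfl, ← pv_testBit_iff]
      simp [h1]
    · subst h
      have h2 : (1 * 2^j + a) % 2^(j+1) = 1 * 2^j + a := by
        apply Nat.mod_eq_of_lt; rw [pow_succ]; omega
      rw [pv_testBit_iff (1 * 2^j + a) j, h2]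
      have h3 : a.testBit j = false := Nat.testBit_lt_two_pow ha
      simp [h3]
    · have h4 : 1 * 2^k + a < 2^j := by
        have h5 : (2:Nat)^(k+1) ≤ 2^j := Nat.pow_le_pow_right (by norm_num) (by omega)
        rw [pow_succ] at h5; omega
      rw [Nat.testBit_lt_two_pow h4,
        Nat.testBit_lt_two_pow (lt_trans ha (Nat.pow_lt_pow_right (by norm_num) h))]
      have h6 : Nat.testBit 1 (j - k) = false := by
        apply Nat.testBit_lt_two_pow
        have : (2:Nat)^1 ≤ 2^(j-k) := Nat.pow_le_pow_right (by norm_num) (by omega)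
        omega
      simp [h6]

-- an element-wise exclusive split of a countP
theorem pv_countP_split (S : List Int) (p q r : Int → Bool)
    (h : ∀ x, x ∈ S → (p x = true ↔ (q x = true ∨ r x = true)) ∧ ¬(q x = true ∧ r x = true)) :
    S.countP p = S.countP q + S.countP r := by
  induction S with
  | nil => simp
  | cons x xs ih =>
    have hx := h x (by simp)
    have ih' := ih (fun y hy => h y (by simp [hy]))
    rw [List.countP_cons, List.countP_cons, List.countP_cons, ih']
    rcases Bool.eq_false_or_eq_true (q x) with hq | hq <;>
      rcases Bool.eq_false_or_eq_true (r x) with hr | hr <;>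
      simp [hq, hr] at hx ⊢ <;> simp [hx] <;> omega

-- prefix characterisation of countP (< v) in a sorted list
theorem pv_sorted_prefix (S : List Int) (hs : S.Pairwise (· ≤ ·)) (v : Int)
    (i : Nat) (hi : i < S.length) :
    (S[i] < v ↔ i < S.countP (fun x => decide (x < v))) := by
  induction S generalizing i with
  | nil => simp at hi
  | cons x xs ih =>
    rw [List.pairwise_cons] at hs
    rw [List.countP_cons]
    cases i with
    | zero =>
      simp only [List.getElem_cons_zero]
      by_cases hx : x < v
      · simp [hx]
      · constructor
        · intro h; exact absurd h hx
        · intro h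
          have hz : xs.countP (fun x => decide (x < v)) = 0 := by
            rw [List.countP_eq_zero]
            intro y hy
            simp only [decide_eq_true_eq]
            have := hs.1 y hy
            omega
          simp [hx, hz] at h
    | succ n =>
      simp only [List.getElem_cons_succ]
      rw [ih hs.2 n (by simpa using hi)]
      by_cases hx : x < v
      · simp [hx]
      · have hz : xs.countP (fun x => decide (x < v)) = 0 := by
          rw [List.countP_eq_zero]
          intro y hy
          simp only [decide_eq_true_eq]
          have := hs.1 y hy
          omega
        simp [hx, hz]

theorem pv_lower_bound_go_eq (S : List Int) (hs : S.Pairwise (· ≤ ·)) (v : Int)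
    (l r : Int) (hl : -1 ≤ l) (hr : r ≤ (S.length : Int)) (hlr : l < r)
    (hcl : l < (S.countP (fun x => decide (x < v)) : Int))
    (hcr : (S.countP (fun x => decide (x < v)) : Int) ≤ r) :
    pv_lower_bound_go S v l r = (S.countP (fun x => decide (x < v)) : Int) := by
  have hcle : S.countP (fun x => decide (x < v)) ≤ S.length := List.countP_le_length
  rw [pv_lower_bound_go]
  by_cases h : r - l > 1
  · simp only [dif_pos h]
    have hm := PySem.Int.floordiv_eq_ediv_of_pos (a := r + l) (b := 2) (by omega)
    set m := PySem.Int.floordiv (r + l) 2 with hmdef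
    have hml : l < m := by omega
    have hmr : m < r := by omega
    have hm0 : 0 ≤ m := by omega
    have hmlen : m.toNat < S.length := by omega
    have hget : PySem.List.pyGet? S m = some S[m.toNat] := by
      conv_lhs => rw [show m = (m.toNat : Int) by omega, PySem.List.pyGet?_natCast]
      exact List.getElem?_eq_getElem hmlen
    rw [hget]
    simp only [Option.getD_some]
    have hiff := pv_sorted_prefix S hs v m.toNat hmlen
    by_cases hlt : S[m.toNat] < v
    · rw [if_pos hlt]
      exact pv_lower_bound_go_eq S hs v m r (by omega) hr hmr (by omega) hcr
    · rw [if_neg hlt]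
      have : ¬ (m.toNat < S.countP (fun x => decide (x < v))) := fun hh => hlt (hiff.mpr hh)
      exact pv_lower_bound_go_eq S hs v l m hl (by omega) hml hcl (by omega)
  · simp only [dif_neg h]
    omega
termination_by (r - l).toNat
decreasing_by
  all_goals
    have h2 := PySem.Int.floordiv_eq_ediv_of_pos (a := r + l) (b := 2) (by omega)
    omega

theorem pv_lower_bound_eq (S : List Int) (hs : S.Pairwise (· ≤ ·)) (v : Int) :
    pv_lower_bound S v = (S.countP (fun x => decide (x < v)) : Int) := by
  have hcle : S.countP (fun x => decide (x < v)) ≤ S.length := List.countP_le_length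
  exact pv_lower_bound_go_eq S hs v (-1) S.length (by omega) (by omega) (by omega) (by omega) (by omega)

-- count(S, a, b) counts the window [a, b) in a sorted list
theorem pv_count_eq (S : List Int) (hs : S.Pairwise (· ≤ ·)) (a b : Int) (hab : a ≤ b) :
    pv_count S a b = (S.countP (fun x => decide (a ≤ x ∧ x < b)) : Int) := by
  show pv_lower_bound S b - pv_lower_bound S a = _
  rw [pv_lower_bound_eq S hs a, pv_lower_bound_eq S hs b]
  have hsplit : S.countP (fun x => decide (x < b)) =
      S.countP (fun x => decide (x < a)) + S.countP (fun x => decide (a ≤ x ∧ x < b)) := by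
    induction S with
    | nil => simp
    | cons x xs ih =>
      rw [List.countP_cons, List.countP_cons, List.countP_cons,
        ih (List.Pairwise.sublist (List.sublist_cons_self x xs) hs)]
      by_cases h1 : x < a <;> by_cases h2 : x < b <;>
        simp [h1, h2, show (a ≤ x) ↔ ¬ (x < a) from by omega] <;> omega
  omega

-- the arithmetic core: the two interval tests on the masked values decide bit k of the sum
theorem pv_interval_bit (ai b : Int) (k : Nat) :
    (pvBit k (ai + b) = true ↔
      ((decide (2^k - ai % (2^(k+1)) ≤ b % (2^(k+1)) ∧ b % (2^(k+1)) < 2*2^k - ai % (2^(k+1)))) = true ∨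
       (decide (3*2^k - ai % (2^(k+1)) ≤ b % (2^(k+1)) ∧ b % (2^(k+1)) < 4*2^k - ai % (2^(k+1)))) = true)) ∧
    ¬ ((decide (2^k - ai % (2^(k+1)) ≤ b % (2^(k+1)) ∧ b % (2^(k+1)) < 2*2^k - ai % (2^(k+1)))) = true ∧
       (decide (3*2^k - ai % (2^(k+1)) ≤ b % (2^(k+1)) ∧ b % (2^(k+1)) < 4*2^k - ai % (2^(k+1)))) = true) := by
  have ht : (0:Int) < 2^k := by positivity
  have hT : ((2:Int)^(k+1)) = 2 * 2^k := by rw [pow_succ]; ring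
  have hTpos : (0:Int) < 2^(k+1) := by positivity
  have ha0 : 0 ≤ ai % (2^(k+1)) := Int.emod_nonneg ai (by omega)
  have ha1 : ai % (2^(k+1)) < 2^(k+1) := Int.emod_lt_of_pos ai hTpos
  have hb0 : 0 ≤ b % (2^(k+1)) := Int.emod_nonneg b (by omega)
  have hb1 : b % (2^(k+1)) < 2^(k+1) := Int.emod_lt_of_pos b hTpos
  have hadd : (ai + b) % (2^(k+1)) = (ai % (2^(k+1)) + b % (2^(k+1))) % (2^(k+1)) := by
    conv_lhs => rw [Int.add_emod]
  set am := ai % (2^(k+1))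
  set bm := b % (2^(k+1))
  have hsum : (am + bm) % (2^(k+1)) = if am + bm < 2^(k+1) then am + bm else am + bm - 2^(k+1) := by
    split_ifs with hc
    · exact Int.emod_eq_of_lt (by omega) hc
    · rw [← Int.sub_emod_right (am + bm) (2^(k+1))]
      exact Int.emod_eq_of_lt (by omega) (by omega)
  unfold pvBit
  rw [hadd, hsum]
  simp only [decide_eq_true_eq]
  split_ifs with hc <;> omega

theorem pv_foldl_add2 (L : List Int) (f g : Int → Int) (a : Int) :
    L.foldl (fun acc x => acc + f x + g x) a = a + (L.map (fun x => f x + g x)).sum := by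
  induction L generalizing a with
  | nil => simp
  | cons x xs ih => simp [ih]; ring

theorem pv_cnt_cast (k : Nat) (A B : List Int) :
    ((pvCnt k A B : Nat) : Int) = (A.map (fun ai => (B.countP (fun b => pvBit k (ai + b)) : Int))).sum := by
  unfold pvCnt
  induction A with
  | nil => simp
  | cons x xs ih => simp only [List.map_cons, List.sum_cons] at *; push_cast at *; omega

-- the inner loop over A computes the number of pairs with bit k set
theorem pv_num_eq (A B : List Int) (k : Nat) :
    (A.foldl (fun num ai =>
      let aiMod := PySem.Int.band ai ((1 : Int) <<< (k+1) - 1)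
      let t := ((1 : Int) <<< (k+1)) >>> (1:Nat)
      let num := num + pv_count (PySem.List.sorted (B.map (fun b => PySem.Int.band b ((1 : Int) <<< (k+1) - 1))) (fun x => x) false) (t - aiMod) (2 * t - aiMod)
      let num := num + pv_count (PySem.List.sorted (B.map (fun b => PySem.Int.band b ((1 : Int) <<< (k+1) - 1))) (fun x => x) false) (3 * t - aiMod) (4 * t - aiMod)
      num) 0) = (pvCnt k A B : Int) := by
  have hshl : ((1 : Int) <<< (k+1)) = 2^(k+1) := by rw [Int.shiftLeft_eq, one_mul]
  have hshr : ((2:Int)^(k+1)) >>> (1:Nat) = 2^k := by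
    rw [Int.shiftRight_eq_div_pow, pow_one, pow_succ]
    exact Int.mul_ediv_cancel _ (by norm_num)
  have ht : (0:Int) < 2^k := by positivity
  simp only [hshl, hshr, pv_band_mask]
  set S := PySem.List.sorted (B.map (fun b => b % ((2:Int)^(k+1)))) (fun x => x) false with hS
  have hpair : S.Pairwise (· ≤ ·) := PySem.List.sorted_pairwise _ _
  have hperm : S.Perm (B.map (fun b => b % (2:Int)^(k+1))) := PySem.List.sorted_perm _ _ _
  have hper : ∀ ai : Int,
      pv_count S (2^k - ai % 2^(k+1)) (2 * 2^k - ai % 2^(k+1)) +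
      pv_count S (3 * 2^k - ai % 2^(k+1)) (4 * 2^k - ai % 2^(k+1)) =
      (B.countP (fun b => pvBit k (ai + b)) : Int) := by
    intro ai
    rw [pv_count_eq S hpair _ _ (by omega), pv_count_eq S hpair _ _ (by omega)]
    rw [hperm.countP_eq, hperm.countP_eq, List.countP_map, List.countP_map]
    have hsplit := pv_countP_split B (fun b => pvBit k (ai + b))
      (fun b => decide (2^k - ai % (2^(k+1)) ≤ b % (2^(k+1)) ∧ b % (2^(k+1)) < 2*2^k - ai % (2^(k+1))))
      (fun b => decide (3*2^k - ai % (2^(k+1)) ≤ b % (2^(k+1)) ∧ b % (2^(k+1)) < 4*2^k - ai % (2^(k+1))))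
      (fun b _ => pv_interval_bit ai b k)
    rw [show ((fun x => decide (2^k - ai % 2^(k+1) ≤ x ∧ x < 2 * 2^k - ai % 2^(k+1))) ∘ (fun b => b % (2:Int)^(k+1)))
        = (fun b => decide (2^k - ai % (2^(k+1)) ≤ b % (2^(k+1)) ∧ b % (2^(k+1)) < 2*2^k - ai % (2^(k+1)))) from rfl]
    rw [show ((fun x => decide (3 * 2^k - ai % 2^(k+1) ≤ x ∧ x < 4 * 2^k - ai % 2^(k+1))) ∘ (fun b => b % (2:Int)^(k+1)))
        = (fun b => decide (3*2^k - ai % (2^(k+1)) ≤ b % (2^(k+1)) ∧ b % (2^(k+1)) < 4*2^k - ai % (2^(k+1)))) from rfl]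
    rw [hsplit]
    push_cast
    ring
  calc (A.foldl (fun num ai =>
          num + pv_count S (2^k - ai % 2^(k+1)) (2 * 2^k - ai % 2^(k+1))
              + pv_count S (3 * 2^k - ai % 2^(k+1)) (4 * 2^k - ai % 2^(k+1))) 0)
      = 0 + (A.map (fun ai =>
          pv_count S (2^k - ai % 2^(k+1)) (2 * 2^k - ai % 2^(k+1))
        + pv_count S (3 * 2^k - ai % 2^(k+1)) (4 * 2^k - ai % 2^(k+1)))).sum := by
        exact pv_foldl_add2 A _ _ 0
    _ = (A.map (fun ai => (B.countP (fun b => pvBit k (ai + b)) : Int))).sum := by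
        rw [zero_add]; congr 1; exact List.map_congr_left (fun ai _ => hper ai)
    _ = (pvCnt k A B : Int) := (pv_cnt_cast k A B).symm

-- A-side outer fold: OR-ing fresh bits builds pvSumBits of the parities
theorem pv_A_fold (c : Nat → Nat) (m : Nat) :
    (List.range m).foldl (fun res k => PySem.Int.bor ((PySem.Int.band ((c k : Nat) : Int) 1) <<< k) res) 0
      = ((pvSumBits (fun k => decide (c k % 2 = 1)) m : Nat) : Int) := by
  induction m with
  | zero => simp [pvSumBits]
  | succ n ih =>
    rw [List.range_succ, List.foldl_append, List.foldl_cons, List.foldl_nil, ih]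
    rw [show (1:Int) = ((1:Nat):Int) from rfl, PySem.Int.band_natCast]
    rw [show ((((c n &&& 1) : Nat) : Int) <<< n) = (((c n &&& 1) <<< n : Nat) : Int) by
      rw [Int.shiftLeft_eq, Nat.shiftLeft_eq]; push_cast; ring]
    rw [PySem.Int.bor_natCast]
    congr 1
    rw [Nat.and_one_is_mod, pv_lor_step _ _ _ (pv_sumBits_lt _ _) (by omega), pv_sumBits_succ]
    rcases Nat.mod_two_eq_zero_or_one (c n) with h | h <;> simp [h] <;> omega

-- B-side fold over the list of pairwise sums
theorem pv_B_fold (S : List Int) (q : Nat → Bool) :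
    S.foldl (fun res s => PySem.Int.bxor res (PySem.Int.band s ((2:Int)^40 - 1)))
        ((pvSumBits q 40 : Nat) : Int)
      = ((pvSumBits (fun k => q k ^^ decide ((S.countP (fun s => pvBit k s)) % 2 = 1)) 40 : Nat) : Int) := by
  induction S generalizing q with
  | nil =>
    simp only [List.foldl_nil, List.countP_nil]
    exact congrArg (fun n : Nat => (n : Int)) (pv_sumBits_congr _ _ _ (fun k _ => by simp))
  | cons s S' ih =>
    rw [List.foldl_cons]
    rw [pv_band_mask]
    have hpos : (0:Int) < 2^40 := by positivity
    have hnn : 0 ≤ s % (2:Int)^40 := Int.emod_nonneg s (by omega)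
    have hlt : s % (2:Int)^40 < 2^40 := Int.emod_lt_of_pos s hpos
    set v : Nat := (s % (2:Int)^40).toNat with hv
    have hc : ((2^40 : Nat) : Int) = (2:Int)^40 := by norm_cast
    have hvlt : v < 2^40 := by omega
    have hveq : ((v : Nat) : Int) = s % (2:Int)^40 := by omega
    rw [← hveq, PySem.Int.bxor_natCast, pv_xor_sumBits q v hvlt]
    rw [ih]
    apply congrArg (fun n : Nat => (n : Int))
    apply pv_sumBits_congr
    intro k hk
    have htb : v.testBit k = pvBit k s := by
      rw [pv_testBit_iff]
      unfold pvBit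
      have hmm : ((v % 2^(k+1) : Nat) : Int) = s % (2:Int)^(k+1) := by
        push_cast
        rw [hveq]
        exact Int.emod_emod_of_dvd s (pow_dvd_pow 2 (by omega))
      have hck : ((2^k : Nat) : Int) = (2:Int)^k := by push_cast; ring
      rcases Nat.lt_or_ge (v % 2^(k+1)) (2^k) with h | h
      · have h2 : ¬ ((2:Int)^k ≤ s % 2^(k+1)) := by omega
        simp [Nat.not_le.mpr h, h2]
      · have h2 : ((2:Int)^k ≤ s % 2^(k+1)) := by omega
        simp [h, h2]
    rw [htb, List.countP_cons]
    have hpar : ∀ (c : Nat) (pb : Bool),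
        decide ((c + if pb = true then 1 else 0) % 2 = 1) = (decide (c % 2 = 1) ^^ pb) := by
      intro c pb
      cases pb
      · simp
      · have h1 : (c + if True then 1 else 0) % 2 = 1 - c % 2 := by
          simp only [if_true]; omega
        simp only [h1]
        rcases Nat.mod_two_eq_zero_or_one c with h | h <;> simp [h]
    rw [hpar, Bool.xor_assoc, Bool.xor_comm (pvBit k s)]

-- countP over a flatMap is the sum of the inner counts
theorem pv_countP_flatMap (A : List Int) (f : Int → List Int) (p : Int → Bool) :
    (A.flatMap f).countP p = (A.map (fun a => (f a).countP p)).sum := by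
  induction A with
  | nil => simp
  | cons x xs ih => simp [List.flatMap_cons, List.countP_append, ih]

theorem pv_A_eq (N : Int) (A B : List Int) : two_sequences N A B = pvTarget A B := by
  unfold two_sequences pvTarget
  refine .trans (List.foldl_ext _ (fun (res : Int) (k : Nat) =>
      PySem.Int.bor ((PySem.Int.band ((pvCnt k A B : Nat) : Int) 1) <<< k) res) 0 ?_)
      (pv_A_fold (fun k => pvCnt k A B) 40)
  intro res k _
  show PySem.Int.bor ((PySem.Int.band (A.foldl (fun num ai =>
      let aiMod := PySem.Int.band ai ((1 : Int) <<< (k+1) - 1)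
      let t := ((1 : Int) <<< (k+1)) >>> (1:Nat)
      let num := num + pv_count (PySem.List.sorted (B.map (fun b => PySem.Int.band b ((1 : Int) <<< (k+1) - 1))) (fun x => x) false) (t - aiMod) (2 * t - aiMod)
      let num := num + pv_count (PySem.List.sorted (B.map (fun b => PySem.Int.band b ((1 : Int) <<< (k+1) - 1))) (fun x => x) false) (3 * t - aiMod) (4 * t - aiMod)
      num) 0) 1) <<< k) res = _
  rw [pv_num_eq A B k]

theorem pv_sumBits_false (m : Nat) : pvSumBits (fun _ => false) m = 0 := by
  induction m with
  | zero => simp [pvSumBits]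
  | succ n ih => rw [pv_sumBits_succ, ih]; simp

theorem pv_B_eq (N : Int) (A B : List Int) : two_sequences_alt N A B = pvTarget A B := by
  unfold two_sequences_alt pvTarget
  have hmask : ((1 : Int) <<< (40 : Nat) - 1) = (2:Int)^40 - 1 := by
    rw [Int.shiftLeft_eq, one_mul]
  show A.foldl (fun res ai =>
      B.foldl (fun res bj => PySem.Int.bxor res (PySem.Int.band (ai + bj) ((1 : Int) <<< (40 : Nat) - 1))) res) 0 = _
  simp only [hmask]
  have hinner : ∀ (ai : Int) (res : Int),
      B.foldl (fun res bj => PySem.Int.bxor res (PySem.Int.band (ai + bj) ((2:Int)^40 - 1))) res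
      = (B.map (fun bj => ai + bj)).foldl
          (fun res s => PySem.Int.bxor res (PySem.Int.band s ((2:Int)^40 - 1))) res := by
    intro ai res
    rw [List.foldl_map]
  simp only [hinner]
  rw [← List.foldl_flatMap]
  rw [show (0:Int) = ((pvSumBits (fun _ => false) 40 : Nat) : Int) by rw [pv_sumBits_false]; rfl]
  rw [pv_B_fold]
  apply congrArg (fun n : Nat => (n : Int))
  apply pv_sumBits_congr
  intro k _
  rw [Bool.false_xor]
  have hcnt : (A.flatMap (fun ai => B.map (fun bj => ai + bj))).countP (fun s => pvBit k s)
      = pvCnt k A B := by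
    rw [pv_countP_flatMap]
    unfold pvCnt
    congr 1
    apply List.map_congr_left
    intro ai _
    rw [List.countP_map]
    rfl
  rw [hcnt]

-- ===== VERDICT (by name: the statement is the Claim_ definition above) =====
theorem two_sequences_spec : Claim_equal_two_sequences := by
  intro N A B _
  unfold Spec_two_sequences
  rw [pv_A_eq, pv_B_eq]
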